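-- pv_equiv track=rewrite | github.com/Poolesville-Computer-Team/phsco-winter25 | problems/E/gpt.py | max_cursed_hexadecimal
-- ===== SOURCE A (Python) =====
-- def max_cursed_hexadecimal(t, test_cases):
--     results = []
--
--     for s in test_cases:
--         # Frequency of each character
--         freq = {}
--         for i, c in enumerate(s):
--             if c not in freq:
--                 freq[c] = 0
--             # Higher position => higher weight
--             freq[c] += 16 ** (len(s) - i - 1)
--
--         # Sort by frequency (descending)
--         sorted_chars = sorted(freq.items(), key=lambda x: -x[1])
--
--         # Assign the highest values to the most significant characters
--         mapping = {}
--         value = 15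
--         for char, _ in sorted_chars:
--             mapping[char] = value
--             value -= 1
--
--         # Calculate the decimal value
--         decimal_value = 0
--         for i, c in enumerate(s):
--             decimal_value += mapping[c] * (16 ** (len(s) - i - 1))
--
--         results.append(decimal_value)
--
--     return results
-- ===== SOURCE B (Python) =====
-- def max_cursed_hexadecimal(t, test_cases):
--     # The heaviest character is always the one whose FIRST occurrence is leftmost
--     # (16**k beats any sum of strictly smaller distinct powers), so the sort by
--     # accumulated weight is just first-appearance order: assign 15,14,... greedily
--     # on first sight and evaluate with Horner's rule in one pass, no dict of
--     # weights, no sort, no powers.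
--     results = []
--     for s in test_cases:
--         digit = {}
--         value = 0
--         for c in s:
--             if c not in digit:
--                 digit[c] = 15 - len(digit)
--             value = value * 16 + digit[c]
--         results.append(value)
--     return results
-- ===== Notes on version B (the rewrite author's own statement) =====
-- stated objective: faster
-- what changed: B drops the weight dictionary, the sort and the per-character 16**k power sums entirely: since 16^k exceeds any sum of smaller distinct powers, descending-weight order is exactly first-appearance order, so B assigns digits 15,14,... greedily on first sight of each character and evaluates the string with Horner's rule in a single pass.
import Mathlib
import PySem

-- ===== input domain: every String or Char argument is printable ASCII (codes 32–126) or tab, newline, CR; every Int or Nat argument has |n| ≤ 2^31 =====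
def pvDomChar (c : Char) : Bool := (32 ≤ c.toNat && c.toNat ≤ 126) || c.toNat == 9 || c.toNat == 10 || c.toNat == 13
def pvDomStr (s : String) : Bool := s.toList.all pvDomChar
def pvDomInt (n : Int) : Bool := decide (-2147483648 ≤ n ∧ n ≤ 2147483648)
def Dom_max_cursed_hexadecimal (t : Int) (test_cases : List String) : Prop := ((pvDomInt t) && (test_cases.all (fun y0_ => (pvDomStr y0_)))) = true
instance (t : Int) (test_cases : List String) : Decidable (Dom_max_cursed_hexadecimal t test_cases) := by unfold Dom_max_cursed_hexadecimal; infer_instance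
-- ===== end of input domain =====

-- B replaces A's weight dictionary + sort + positional-power sum by a single greedy pass:
-- descending-weight order is first-appearance order, so B assigns 15,14,... on first sight
-- and evaluates by Horner's rule (objective: faster — measured).

-- ===== PORT A =====
-- loop body of A's freq loop: `if c not in freq: freq[c] = 0` then `freq[c] += 16 ** (len(s) - i - 1)`
-- (the enumerate index always satisfies 0 ≤ i < len(s), so `.toNat` in the exponent is exact;
--  `freq[c]` / `mapping[c]` are read with getD 0 — the key is always present at that point in A)
def aFreqStep (L : Nat) (d : PySem.Dict Char Int) (ic : Int × Char) : PySem.Dict Char Int :=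
  let d1 := if d.contains ic.2 then d else d.insert ic.2 0
  d1.insert ic.2 (d1.getD ic.2 0 + 16 ^ (L - 1 - ic.1.toNat))

-- the body of A's `for s in test_cases` loop
def aBest (cs : List Char) : Int :=
  let L := cs.length
  let freq := (PySem.List.enumerate cs).foldl (aFreqStep L) PySem.Dict.empty
  let sorted_chars := PySem.List.sorted freq.items (fun x => -x.2) false
  let mapping := (sorted_chars.foldl
      (fun (st : PySem.Dict Char Int × Int) cw => (st.1.insert cw.1 st.2, st.2 - 1))
      (PySem.Dict.empty, 15)).1
  (PySem.List.enumerate cs).foldl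
    (fun acc ic => acc + mapping.getD ic.2 0 * 16 ^ (L - 1 - ic.1.toNat)) 0

def max_cursed_hexadecimal (t : Int) (test_cases : List String) : List Int :=
  test_cases.foldl (fun results s => results ++ [aBest s.toList]) []

-- ===== PORT B =====
-- body of B's `for c in s` loop: insert a fresh character with digit 15 - len(digit),
-- then value = value * 16 + digit[c] (the key is always present after the insert: getD 0)
def bStep (st : PySem.Dict Char Int × Int) (c : Char) : PySem.Dict Char Int × Int :=
  let d := if st.1.contains c then st.1 else st.1.insert c (15 - (st.1.items.length : Int))
  (d, st.2 * 16 + d.getD c 0)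

def bBest (cs : List Char) : Int :=
  (cs.foldl bStep (PySem.Dict.empty, 0)).2

def max_cursed_hexadecimal_alt (t : Int) (test_cases : List String) : List Int :=
  test_cases.foldl (fun results s => results ++ [bBest s.toList]) []

-- ===== PRECONDITION & SPEC =====
def Spec_max_cursed_hexadecimal (t : Int) (test_cases : List String) (out : List Int) : Prop := out = max_cursed_hexadecimal_alt t test_cases
instance (t : Int) (test_cases : List String) (out : List Int) : Decidable (Spec_max_cursed_hexadecimal t test_cases out) := by unfold Spec_max_cursed_hexadecimal; infer_instance

-- ===== CLAIM (what is proved, stated in full; the proofs are below) =====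
def Claim_equal_max_cursed_hexadecimal : Prop := ∀ (t : Int) (test_cases : List String), Dom_max_cursed_hexadecimal t test_cases → Spec_max_cursed_hexadecimal t test_cases (max_cursed_hexadecimal t test_cases)

-- ===== LEMMAS AND PROOFS =====

theorem insert_insert_self (d : PySem.Dict Char Int) (k : Char) (v v' : Int) :
    (d.insert k v).insert k v' = d.insert k v' := by
  apply PySem.Dict.ext
  rcases hc : d.contains k with _ | _
  · have hc2 : (d.insert k v).contains k = true := PySem.Dict.contains_insert_self d k v
    rw [PySem.Dict.items_insert_of_contains _ v' hc2,
        PySem.Dict.items_insert_of_not_contains _ v hc,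
        PySem.Dict.items_insert_of_not_contains _ v' hc]
    rw [List.map_append]
    congr 1
    · nth_rewrite 2 [← List.map_id d.items]
      apply List.map_congr_left
      intro p hp
      have : p.1 ∈ d.keys := PySem.Dict.mem_keys_of_mem_items d hp
      have hne : p.1 ≠ k := by
        intro he; rw [he] at this
        exact absurd ((PySem.Dict.contains_iff_mem_keys d k).mpr this) (by simp [hc])
      simp [hne]
    · simp
  · have hc2 : (d.insert k v).contains k = true := PySem.Dict.contains_insert_self d k v
    rw [PySem.Dict.items_insert_of_contains _ v' hc2,
        PySem.Dict.items_insert_of_contains _ v hc,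
        PySem.Dict.items_insert_of_contains _ v' hc, List.map_map]
    apply List.map_congr_left
    intro p hp
    by_cases he : p.1 = k <;> simp [he]

-- A's guarded "set to 0 then +=" step is a single overwrite-insert
theorem aFreqStep_eq (L : Nat) (d : PySem.Dict Char Int) (ic : Int × Char) :
    aFreqStep L d ic = d.insert ic.2 (d.getD ic.2 0 + 16 ^ (L - 1 - ic.1.toNat)) := by
  unfold aFreqStep
  rcases hc : d.contains ic.2 with _ | _
  · simp only [Bool.false_eq_true, if_false]
    rw [PySem.Dict.getD_insert_self, insert_insert_self,
        PySem.Dict.getD_of_not_contains d 0 hc]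
  · simp

-- the canonical weight-accumulation fold A's freq loop reduces to
def accD (l : List (Char × Int)) (d : PySem.Dict Char Int) : PySem.Dict Char Int :=
  l.foldl (fun d p => d.insert p.1 (d.getD p.1 0 + p.2)) d

-- the list of (character, positional weight) pairs A's freq loop accumulates
def wl : List Char → Nat → List (Char × Int)
  | [], _ => []
  | c :: r, e => (c, (16 : Int) ^ (e - 1)) :: wl r (e - 1)

theorem wl_fst : ∀ (cs : List Char) (e : Nat), (wl cs e).map Prod.fst = cs := by
  intro cs
  induction cs with
  | nil => intro e; rfl
  | cons c r ih => intro e; simp [wl, ih]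

theorem wlA_eq : ∀ (cs : List Char) (s L : Nat),
    (PySem.List.enumerate cs (s : Int)).map
        (fun ic => (ic.2, (16 : Int) ^ (L - 1 - ic.1.toNat)))
      = wl cs (L - s) := by
  intro cs
  induction cs with
  | nil => intro s L; simp [PySem.List.enumerate_nil, wl]
  | cons c r ih =>
      intro s L
      rw [PySem.List.enumerate_cons, List.map_cons, wl]
      have h1 : ((s : Int) + 1) = ((s + 1 : Nat) : Int) := by push_cast; ring
      rw [h1, ih (s + 1) L]
      have h2 : L - (s + 1) = L - s - 1 := by omega
      have h3 : L - 1 - ((s : Int), c).1.toNat = L - s - 1 := by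
        simp [Int.toNat_natCast]; omega
      rw [h2, h3]

theorem aFold_eq (cs : List Char) (s L : Nat) (d : PySem.Dict Char Int) :
    (PySem.List.enumerate cs (s : Int)).foldl (aFreqStep L) d = accD (wl cs (L - s)) d := by
  rw [← wlA_eq cs s L]
  unfold accD
  rw [List.foldl_map]
  apply List.foldl_ext
  intro d' ic _
  exact aFreqStep_eq L d' ic

theorem aFold_eq0 (cs : List Char) (L : Nat) (d : PySem.Dict Char Int) :
    (PySem.List.enumerate cs 0).foldl (aFreqStep L) d = accD (wl cs L) d := by
  have h := aFold_eq cs 0 L d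
  simpa using h

theorem wlA_eq0 (cs : List Char) (L : Nat) :
    (PySem.List.enumerate cs 0).map (fun ic => (ic.2, (16 : Int) ^ (L - 1 - ic.1.toNat))) = wl cs L := by
  have h := wlA_eq cs 0 L
  simpa using h

-- ---- the geometric bound: freq's values come out strictly decreasing in insertion order ----

-- Sg e = 16^0 + … + 16^(e-1), the largest weight a character first seen later can still amass
def Sg : Nat → Int
  | 0 => 0
  | e + 1 => Sg e + 16 ^ e

theorem Sg_lt_pow : ∀ e, Sg e < 16 ^ e := by
  intro e
  induction e with
  | zero => simp [Sg]
  | succ e ih =>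
      have h16 : (16 : Int) ^ e + 16 ^ e ≤ 16 ^ (e + 1) := by
        have : (0 : Int) ≤ 16 ^ e := by positivity
        rw [pow_succ]
        nlinarith
      simp only [Sg]
      omega

-- one freq insertion keeps the invariant (values strictly decreasing with gap Sg, all > Sg)
theorem inv_step (d : PySem.Dict Char Int) (c : Char) (e : Nat)
    (hn : d.keys.Nodup)
    (hp : d.items.Pairwise (fun p q => q.2 + Sg (e + 1) < p.2))
    (hb : ∀ p ∈ d.items, Sg (e + 1) < p.2) :
    (d.insert c (d.getD c 0 + 16 ^ e)).keys.Nodup ∧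
    (d.insert c (d.getD c 0 + 16 ^ e)).items.Pairwise (fun p q => q.2 + Sg e < p.2) ∧
    (∀ p ∈ (d.insert c (d.getD c 0 + 16 ^ e)).items, Sg e < p.2) := by
  have hpow : (0 : Int) < 16 ^ e := by positivity
  have hSg : Sg (e + 1) = Sg e + 16 ^ e := rfl
  rw [hSg] at hp hb
  refine ⟨PySem.Dict.nodup_keys_insert d c _ hn, ?_⟩
  rcases hc : d.contains c with _ | _
  · rw [PySem.Dict.items_insert_of_not_contains _ _ hc,
        PySem.Dict.getD_of_not_contains d 0 hc]
    constructor
    · rw [List.pairwise_append]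
      refine ⟨hp.imp (by intro p q h; omega), by simp, ?_⟩
      intro p hpmem q hq
      simp only [List.mem_singleton] at hq
      subst hq
      have := hb p hpmem
      simp only
      omega
    · intro p hpmem
      rcases List.mem_append.mp hpmem with h | h
      · have := hb p h; omega
      · simp only [List.mem_singleton] at h
        subst h
        have := Sg_lt_pow e
        simp only
        omega
  · rw [PySem.Dict.items_insert_of_contains _ _ hc]
    have hmap : d.items.map (fun p => if p.1 == c then (c, d.getD c 0 + 16 ^ e) else p)
        = d.items.map (fun p => if p.1 = c then (p.1, p.2 + 16 ^ e) else p) := by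
      apply List.map_congr_left
      intro p hpmem
      by_cases hpc : p.1 = c
      · have hpe : p = (c, p.2) := by rw [← hpc]
        have : d.getD c 0 = p.2 :=
          PySem.Dict.getD_of_mem_items d (by rw [← hpe]; exact hpmem) hn 0
        simp [hpc, this]
      · simp [hpc]
    rw [hmap]
    constructor
    · rw [List.pairwise_map]
      refine hp.imp ?_
      intro p q h
      by_cases hpc : p.1 = c <;> by_cases hqc : q.1 = c <;> simp [hpc, hqc] <;> omega
    · intro p hpmem
      rcases List.mem_map.mp hpmem with ⟨q, hq, rfl⟩
      have := hb q hq
      by_cases hqc : q.1 = c <;> simp [hqc] <;> omega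

theorem inv_main : ∀ (cs : List Char) (e : Nat) (d : PySem.Dict Char Int),
    cs.length ≤ e → d.keys.Nodup →
    d.items.Pairwise (fun p q => q.2 + Sg e < p.2) →
    (∀ p ∈ d.items, Sg e < p.2) →
    (accD (wl cs e) d).items.Pairwise (fun p q => q.2 + Sg (e - cs.length) < p.2) := by
  intro cs
  induction cs with
  | nil => intro e d _ _ hp _; simpa [accD, wl] using hp
  | cons c r ih =>
      intro e d hle hn hp hb
      have hle' : r.length + 1 ≤ e := by simpa using hle
      obtain ⟨e', rfl⟩ : ∃ e', e = e' + 1 := ⟨e - 1, by omega⟩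
      have hstep := inv_step d c e' hn hp hb
      have hacc : accD (wl (c :: r) (e' + 1)) d
          = accD (wl r e') (d.insert c (d.getD c 0 + 16 ^ e')) := by
        simp [wl, accD]
      rw [hacc]
      have hr := ih e' _ (by omega) hstep.1 hstep.2.1 hstep.2.2
      have he : e' - r.length = e' + 1 - (c :: r).length := by simp
      rwa [he] at hr

-- ---- which value each character is assigned: 15 minus its first-appearance rank ----

theorem getD_mfold_not_mem : ∀ (rs : List (Char × Int)) (m : PySem.Dict Char Int) (v : Int) (k : Char),
    k ∉ rs.map Prod.fst →
    (rs.foldl (fun (st : PySem.Dict Char Int × Int) cw => (st.1.insert cw.1 st.2, st.2 - 1)) (m, v)).1.getD k 0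
      = m.getD k 0 := by
  intro rs
  induction rs with
  | nil => intro m v k _; rfl
  | cons p r ih =>
      intro m v k hk
      simp only [List.map_cons, List.mem_cons, not_or] at hk
      rw [List.foldl_cons, ih _ _ _ hk.2, PySem.Dict.getD_insert_of_ne _ _ _ hk.1]

-- A's mapping loop gives the i-th key of its input list the value v0 - i
theorem aGetD : ∀ (l : List (Char × Int)) (m0 : PySem.Dict Char Int) (v0 : Int) (c : Char),
    (l.map Prod.fst).Nodup → c ∈ l.map Prod.fst →
    (l.foldl (fun (st : PySem.Dict Char Int × Int) cw => (st.1.insert cw.1 st.2, st.2 - 1)) (m0, v0)).1.getD c 0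
      = v0 - ((l.map Prod.fst).idxOf c : Int) := by
  intro l
  induction l with
  | nil => intro m0 v0 c _ h; simp at h
  | cons p r ih =>
      intro m0 v0 c hnd hmem
      simp only [List.map_cons, List.nodup_cons] at hnd
      rw [List.foldl_cons]
      by_cases hc : c = p.1
      · subst hc
        rw [getD_mfold_not_mem r _ _ _ hnd.1, PySem.Dict.getD_insert_self]
        simp
      · have hmem' : c ∈ r.map Prod.fst := by
          simp only [List.map_cons, List.mem_cons] at hmem
          tauto
        rw [ih _ _ _ hnd.2 hmem']
        rw [List.map_cons, List.idxOf_cons_ne _ (by exact fun h => hc h.symm)]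
        push_cast
        ring

-- ---- B's single pass, split into its dict component and its Horner value ----

def bStepD (d : PySem.Dict Char Int) (c : Char) : PySem.Dict Char Int :=
  if d.contains c then d else d.insert c (15 - (d.items.length : Int))

def bD (cs : List Char) (d : PySem.Dict Char Int) : PySem.Dict Char Int :=
  cs.foldl bStepD d

theorem mem_keys_bStepD (d : PySem.Dict Char Int) (x c : Char) (hc : c ∈ d.keys) :
    c ∈ (bStepD d x).keys := by
  unfold bStepD
  split_ifs with hx
  · exact hc
  · exact (PySem.Dict.mem_keys_insert d _ _ _).mpr (Or.inr hc)

theorem bD_stable : ∀ (cs : List Char) (d : PySem.Dict Char Int) (c : Char), c ∈ d.keys →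
    (bD cs d).getD c 0 = d.getD c 0 := by
  intro cs
  induction cs with
  | nil => intro d c _; rfl
  | cons x r ih =>
      intro d c hc
      have h1 : bD (x :: r) d = bD r (bStepD d x) := rfl
      rw [h1, ih _ _ (mem_keys_bStepD d x c hc)]
      unfold bStepD
      split_ifs with hx
      · rfl
      · have hxc : x ≠ c := by
          intro he; subst he
          exact hx ((PySem.Dict.contains_iff_mem_keys d x).mpr hc)
        exact PySem.Dict.getD_insert_of_ne _ _ _ (fun h => hxc h.symm)

theorem bD_keys : ∀ (cs : List Char) (d : PySem.Dict Char Int),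
    (bD cs d).keys = PySem.Set.update d.keys cs := by
  intro cs
  induction cs with
  | nil => intro d; rfl
  | cons x r ih =>
      intro d
      rw [PySem.Set.update_cons]
      have h1 : bD (x :: r) d = bD r (bStepD d x) := rfl
      rw [h1, ih]
      congr 1
      unfold bStepD
      split_ifs with hx
      · rw [PySem.Set.add_of_mem ((PySem.Dict.contains_iff_mem_keys d x).mp hx)]
      · rw [PySem.Dict.keys_insert_of_not_contains _ _ (by simpa using hx),
            PySem.Set.add_of_not_mem (fun h =>
              hx ((PySem.Dict.contains_iff_mem_keys d x).mpr h))]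

theorem bD_nodup (cs : List Char) (d : PySem.Dict Char Int) (h : d.keys.Nodup) :
    (bD cs d).keys.Nodup := by
  rw [bD_keys]
  exact PySem.Set.nodup_update _ _ h

-- invariant: every value in B's dict is 15 minus its key's position
def Pd (d : PySem.Dict Char Int) : Prop :=
  ∀ p ∈ d.items, p.2 = 15 - (d.keys.idxOf p.1 : Int)

theorem Pd_bStepD (d : PySem.Dict Char Int) (x : Char) (h : Pd d) : Pd (bStepD d x) := by
  unfold bStepD
  split_ifs with hx
  · exact h
  · intro p hpmem
    have hxk : x ∉ d.keys := fun hm => hx ((PySem.Dict.contains_iff_mem_keys d x).mpr hm)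
    have hxc : d.contains x = false := by
      rcases hcc : d.contains x with _ | _
      · rfl
      · exact absurd hcc hx
    rw [PySem.Dict.items_insert_of_not_contains _ _ hxc] at hpmem
    rw [PySem.Dict.keys_insert_of_not_contains _ _ hxc]
    rcases List.mem_append.mp hpmem with hm | hm
    · have h1 := h p hm
      have h2 : p.1 ∈ d.keys := PySem.Dict.mem_keys_of_mem_items d hm
      rw [List.idxOf_append_of_mem h2]
      exact h1
    · simp only [List.mem_singleton] at hm
      subst hm
      rw [List.idxOf_append_of_notMem hxk]
      simp only [List.idxOf_cons_self, Nat.add_zero]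
      have hlen : d.keys.length = d.items.length := by
        simp [PySem.Dict.keys]
      simp [hlen]

theorem bD_P : ∀ (cs : List Char) (d : PySem.Dict Char Int), Pd d → Pd (bD cs d) := by
  intro cs
  induction cs with
  | nil => intro d h; exact h
  | cons x r ih =>
      intro d h
      have h1 : bD (x :: r) d = bD r (bStepD d x) := rfl
      rw [h1]
      exact ih _ (Pd_bStepD d x h)

theorem getD_of_Pd (d : PySem.Dict Char Int) (c : Char) (hn : d.keys.Nodup) (hP : Pd d)
    (hc : c ∈ d.keys) : d.getD c 0 = 15 - (d.keys.idxOf c : Int) := by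
  have : c ∈ d.items.map Prod.fst := by simpa [PySem.Dict.keys] using hc
  rcases List.mem_map.mp this with ⟨p, hpmem, hpc⟩
  have hpe : p = (c, p.2) := by rw [← hpc]
  have hg : d.getD c 0 = p.2 :=
    PySem.Dict.getD_of_mem_items d (by rw [← hpe]; exact hpmem) hn 0
  rw [hg, hP p hpmem, hpc]

theorem bStep_eq (st : PySem.Dict Char Int × Int) (c : Char) :
    bStep st c = (bStepD st.1 c, st.2 * 16 + (bStepD st.1 c).getD c 0) := rfl

theorem bfold_snd : ∀ (cs : List Char) (d : PySem.Dict Char Int) (v : Int),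
    (cs.foldl bStep (d, v)).2
      = v * 16 ^ cs.length + ((wl cs cs.length).map (fun p => (bD cs d).getD p.1 0 * p.2)).sum := by
  intro cs
  induction cs with
  | nil => intro d v; simp [wl]
  | cons c r ih =>
      intro d v
      rw [List.foldl_cons, bStep_eq, ih]
      have hbd : bD r (bStepD d c) = bD (c :: r) d := rfl
      have hck : c ∈ (bStepD d c).keys := by
        unfold bStepD
        split_ifs with hx
        · exact (PySem.Dict.contains_iff_mem_keys d c).mp hx
        · exact (PySem.Dict.mem_keys_insert d _ _ _).mpr (Or.inl rfl)
      have hcv : (bD (c :: r) d).getD c 0 = (bStepD d c).getD c 0 := by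
        rw [← hbd]
        exact bD_stable r _ c hck
      rw [hbd]
      have hwl : wl (c :: r) (r.length + 1) = (c, (16 : Int) ^ r.length) :: wl r r.length := by
        simp [wl]
      show (v * 16 + (bStepD d c).getD c 0) * 16 ^ r.length
            + ((wl r r.length).map (fun p => (bD (c :: r) d).getD p.1 0 * p.2)).sum
          = v * 16 ^ (c :: r).length
            + ((wl (c :: r) (c :: r).length).map (fun p => (bD (c :: r) d).getD p.1 0 * p.2)).sum
      rw [List.length_cons, hwl, List.map_cons, List.sum_cons, hcv]
      ring

-- ---- assembling: both programs are Σ (15 - rank of c) · 16^(position weight) ----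

theorem best_eq (cs : List Char) : aBest cs = bBest cs := by
  unfold aBest bBest
  dsimp only
  rw [aFold_eq0 cs cs.length PySem.Dict.empty]
  set D := accD (wl cs cs.length) PySem.Dict.empty with hD
  have hDnodup : D.keys.Nodup := by
    rw [hD]
    exact PySem.Dict.nodup_keys_foldl_insert_key _ _ _ _ PySem.Dict.nodup_keys_empty
  have hDkeys : D.keys = PySem.Set.ofList cs := by
    rw [hD]
    show (List.foldl (fun d p => d.insert p.1 (d.getD p.1 0 + p.2)) PySem.Dict.empty (wl cs cs.length)).keys = _
    rw [PySem.Dict.keys_foldl_insert_key]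
    rw [PySem.Dict.keys_empty, wl_fst, PySem.Set.update_nil_left]
  have hpair : D.items.Pairwise (fun p q => q.2 + Sg 0 < p.2) := by
    have := inv_main cs cs.length PySem.Dict.empty (le_refl _) PySem.Dict.nodup_keys_empty
      (by simp [PySem.Dict.empty]) (by simp [PySem.Dict.empty])
    simpa using this
  have hsorted : PySem.List.sorted D.items (fun x => -x.2) false = D.items := by
    refine PySem.List.sorted_eq_of_perm_of_pairwise_lt _ _ _ (List.Perm.refl _) (hpair.imp ?_)
    intro p q h
    simp only [Sg] at h
    omega
  rw [hsorted]
  set M := (D.items.foldl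
      (fun (st : PySem.Dict Char Int × Int) cw => (st.1.insert cw.1 st.2, st.2 - 1))
      (PySem.Dict.empty, 15)).1 with hM
  rw [PySem.List.foldl_add (PySem.List.enumerate cs) (fun ic => M.getD ic.2 0 * 16 ^ (cs.length - 1 - ic.1.toNat)) 0]
  have hmm : (PySem.List.enumerate cs 0).map (fun ic => M.getD ic.2 0 * 16 ^ (cs.length - 1 - ic.1.toNat))
      = ((PySem.List.enumerate cs 0).map (fun ic => (ic.2, (16 : Int) ^ (cs.length - 1 - ic.1.toNat)))).map
          (fun p => M.getD p.1 0 * p.2) := by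
    rw [List.map_map]; rfl
  rw [hmm, wlA_eq0, bfold_snd]
  have hBnodup := bD_nodup cs PySem.Dict.empty PySem.Dict.nodup_keys_empty
  have hBkeys : (bD cs PySem.Dict.empty).keys = PySem.Set.ofList cs := by
    rw [bD_keys, PySem.Dict.keys_empty, PySem.Set.update_nil_left]
  have hBP : Pd (bD cs PySem.Dict.empty) :=
    bD_P cs PySem.Dict.empty (by intro p hp; simp [PySem.Dict.empty] at hp)
  have hcong : ∀ p ∈ wl cs cs.length,
      M.getD p.1 0 = (bD cs PySem.Dict.empty).getD p.1 0 := by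
    intro p hpmem
    have hpc : p.1 ∈ cs := by
      rw [← wl_fst cs cs.length]
      exact List.mem_map.mpr ⟨p, hpmem, rfl⟩
    have hset : p.1 ∈ PySem.Set.ofList cs := (PySem.Set.mem_ofList _ _).mpr hpc
    have hA : M.getD p.1 0 = 15 - ((D.items.map Prod.fst).idxOf p.1 : Int) := by
      rw [hM]
      apply aGetD
      · simpa [PySem.Dict.keys] using hDnodup
      · show p.1 ∈ D.items.map Prod.fst
        have : D.items.map Prod.fst = D.keys := by simp [PySem.Dict.keys]
        rw [this, hDkeys]
        exact hset
    have hil : D.items.map Prod.fst = D.keys := by simp [PySem.Dict.keys]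
    rw [hA, hil, hDkeys,
        getD_of_Pd _ _ hBnodup hBP (by rw [hBkeys]; exact hset), hBkeys]
  have hmaps : (wl cs cs.length).map (fun p => M.getD p.1 0 * p.2)
      = (wl cs cs.length).map (fun p => (bD cs PySem.Dict.empty).getD p.1 0 * p.2) :=
    List.map_congr_left (fun p hp => by rw [hcong p hp])
  rw [hmaps]
  ring

-- ===== VERDICT (by name: the statement is the Claim_ definition above) =====
theorem max_cursed_hexadecimal_spec : Claim_equal_max_cursed_hexadecimal := by
  intro t test_cases _
  unfold Spec_max_cursed_hexadecimal max_cursed_hexadecimal max_cursed_hexadecimal_alt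
  rw [PySem.List.foldl_append_singleton_eq_map (fun s => aBest s.toList) test_cases [],
      PySem.List.foldl_append_singleton_eq_map (fun s => bBest s.toList) test_cases []]
  simp [best_eq]
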